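-- pv_equiv track=rewrite | github.com/okorokoo/leetcode-solutions | 455_assign_cookies/455_assign_cookies.py | findContentChildren
-- ===== SOURCE A (Python) =====
-- from typing import List
--
-- def findContentChildren(g: List[int], s: List[int]) -> int:
--     count = 0
--     s = sorted(s)[::-1]
--     g = sorted(g)[::-1]
--     for _g in g:
--         if not s:
--             break
--         if s[0] >= _g:
--             count += 1
--             s.remove(s[0])
--     return count
-- ===== SOURCE B (Python) =====
-- def findContentChildren(g, s):
--     g = sorted(g)
--     s = sorted(s)
--     i = 0
--     for cookie in s:
--         if i < len(g) and cookie >= g[i]: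
--             i += 1
--     return i
-- ===== Notes on version B (the rewrite author's own statement) =====
-- stated objective: faster
-- what changed: Replaces the descending scan with repeated list removal (each satisfied child pays an O(n) remove/shift) by an ascending single pass over the cookies with a child index, so no list is ever mutated.
import Mathlib
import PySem

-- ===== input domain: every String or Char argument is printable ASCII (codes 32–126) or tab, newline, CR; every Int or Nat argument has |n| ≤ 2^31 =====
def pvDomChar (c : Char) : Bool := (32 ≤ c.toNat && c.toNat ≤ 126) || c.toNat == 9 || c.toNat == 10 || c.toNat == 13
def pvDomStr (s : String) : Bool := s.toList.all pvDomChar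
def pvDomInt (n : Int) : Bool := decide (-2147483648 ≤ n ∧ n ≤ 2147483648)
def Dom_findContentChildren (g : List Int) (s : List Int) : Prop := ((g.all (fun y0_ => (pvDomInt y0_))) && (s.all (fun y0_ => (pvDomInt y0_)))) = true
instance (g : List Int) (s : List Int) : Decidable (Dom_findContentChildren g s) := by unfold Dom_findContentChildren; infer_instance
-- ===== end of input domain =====

-- B replaces A's descending scan with list.remove (quadratic) by an ascending single
-- pass over the cookies with a child index; return value only (A mutates only local copies).

-- ===== PORT A =====
-- for _g in g: if not s: break; if s[0] >= _g: count += 1; s.remove(s[0])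
def aLoop : List Int → List Int → Int → Int
  | [], _, count => count
  | _g :: gt, s, count =>
    match s with
    | [] => count
    | y :: _ =>
      if y ≥ _g then
        aLoop gt ((PySem.List.remove? s y).getD s) (count + 1)
      else
        aLoop gt s count

def findContentChildren (g : List Int) (s : List Int) : Int :=
  let s1 := (PySem.List.slice? (PySem.List.sorted s (fun x => x) false) none none (-1)).getD []
  let g1 := (PySem.List.slice? (PySem.List.sorted g (fun x => x) false) none none (-1)).getD []
  aLoop g1 s1 0

-- ===== PORT B =====
-- for cookie in s: if i < len(g) and cookie >= g[i]: i += 1   (guard ensures the index is in range, so pyGetD is exact)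
def altGo (g : List Int) : List Int → Int → Int
  | [], i => i
  | c :: rest, i =>
    if i < (g.length : Int) ∧ PySem.List.pyGetD g i 0 ≤ c then
      altGo g rest (i + 1)
    else
      altGo g rest i

def findContentChildren_alt (g : List Int) (s : List Int) : Int :=
  altGo (PySem.List.sorted g (fun x => x) false) (PySem.List.sorted s (fun x => x) false) 0

-- ===== PRECONDITION & SPEC =====
def Spec_findContentChildren (g : List Int) (s : List Int) (out : Int) : Prop := out = findContentChildren_alt g s
instance (g : List Int) (s : List Int) (out : Int) : Decidable (Spec_findContentChildren g s out) := by unfold Spec_findContentChildren; infer_instance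

-- ===== CLAIM (what is proved, stated in full; the proofs are below) =====
def Claim_equal_findContentChildren : Prop := ∀ (g : List Int) (s : List Int), Dom_findContentChildren g s → Spec_findContentChildren g s (findContentChildren g s)

-- ===== LEMMAS AND PROOFS =====

-- reference two-pointer loop on ascending lists (children, cookies)
def bL : List Int → List Int → Int
  | _, [] => 0
  | [], _ :: _ => 0
  | x :: gt, y :: st => if x ≤ y then 1 + bL gt st else bL (x :: gt) st

lemma bL_nil_right (g : List Int) : bL g [] = 0 := by cases g <;> rfl

lemma bL_nil_left (s : List Int) : bL [] s = 0 := by cases s <;> rfl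

lemma bL_one (sh : Int) (l : List Int) (hle : ∀ x ∈ l, x ≤ sh) (hne : l ≠ []) :
    bL l [sh] = 1 := by
  induction l with
  | nil => exact absurd rfl hne
  | cons x t ih =>
    have hx : x ≤ sh := hle x (by simp)
    simp [bL, if_pos hx]

lemma bL_snoc_match : ∀ (s g : List Int) (gh sh : Int), gh ≤ sh → (∀ x ∈ g, x ≤ gh) →
    bL (g ++ [gh]) (s ++ [sh]) = 1 + bL g s := by
  intro s
  induction s with
  | nil =>
    intro g gh sh hgs hg
    rw [bL_nil_right, List.nil_append]
    rw [bL_one sh (g ++ [gh]) ?side (by simp)]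
    case side =>
      intro x hx
      rcases List.mem_append.1 hx with h | h
      · exact le_trans (hg x h) hgs
      · simp at h; omega
    omega
  | cons y s' ih =>
    intro g gh sh hgs hg
    cases g with
    | nil =>
      simp only [List.nil_append, List.cons_append, bL]
      by_cases hy : gh ≤ y
      · simp [if_pos hy, bL_nil_left]
      · have := ih [] gh sh hgs (by simp)
        simp only [List.nil_append] at this
        simp [this, bL_nil_left]
    | cons x g' =>
      simp only [List.cons_append, bL]
      by_cases hy : x ≤ y
      · have := ih g' gh sh hgs (fun z hz => hg z (by simp [hz]))
        rw [if_pos hy, this]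
        omega
      · have := ih (x :: g') gh sh hgs hg
        simp only [List.cons_append] at this
        rw [if_neg hy, this, if_neg hy]

lemma bL_snoc_skip : ∀ (s g : List Int) (gh : Int), (∀ y ∈ s, y < gh) →
    bL (g ++ [gh]) s = bL g s := by
  intro s
  induction s with
  | nil => intro g gh _; rw [bL_nil_right, bL_nil_right]
  | cons y s' ih =>
    intro g gh hs
    cases g with
    | nil =>
      simp only [List.nil_append, bL]
      have hy : ¬ gh ≤ y := by have := hs y (by simp); omega
      have := ih [] gh (fun z hz => hs z (by simp [hz]))
      simp only [List.nil_append] at this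
      simp [this, bL_nil_left]
      exact hs y (by simp)
    | cons x g' =>
      simp only [List.cons_append, bL]
      by_cases hy : x ≤ y
      · simp only [if_pos hy, ih g' gh (fun z hz => hs z (by simp [hz]))]
      · have := ih (x :: g') gh (fun z hz => hs z (by simp [hz]))
        simp only [List.cons_append] at this
        rw [if_neg hy, this, if_neg hy]

-- A's descending loop computes the ascending two-pointer count on the reversed lists
lemma aLoop_eq_bL : ∀ (gs s : List Int) (c : Int), gs.Pairwise (· ≥ ·) → s.Pairwise (· ≥ ·) →
    aLoop gs s c = c + bL gs.reverse s.reverse := by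
  intro gs
  induction gs with
  | nil => intro s c _ _; simp [aLoop, bL_nil_left]
  | cons x gt ih =>
    intro s c hg hs
    cases s with
    | nil => simp [aLoop, bL_nil_right]
    | cons y st =>
      have hgx : ∀ z ∈ gt, z ≤ x := (List.pairwise_cons.1 hg).1
      have hgt : gt.Pairwise (· ≥ ·) := (List.pairwise_cons.1 hg).2
      have hsy : ∀ z ∈ st, z ≤ y := (List.pairwise_cons.1 hs).1
      have hst : st.Pairwise (· ≥ ·) := (List.pairwise_cons.1 hs).2
      simp only [aLoop, List.reverse_cons]
      by_cases hxy : y ≥ x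
      · rw [if_pos hxy]
        simp only [PySem.List.remove?_cons_self, Option.getD_some]
        rw [ih st (c + 1) hgt hst]
        rw [bL_snoc_match st.reverse gt.reverse x y hxy
          (fun z hz => hgx z (List.mem_reverse.1 hz))]
        omega
      · rw [if_neg hxy]
        rw [ih (y :: st) c hgt hs, List.reverse_cons]
        rw [bL_snoc_skip (st.reverse ++ [y]) gt.reverse x ?side]
        case side =>
          intro z hz
          rcases List.mem_append.1 hz with h | h
          · have := hsy z (List.mem_reverse.1 h); omega
          · simp at h; omega

-- B's indexed loop computes the two-pointer count on the child suffix
lemma altGo_eq_bL : ∀ (s g : List Int) (n : Nat), altGo g s (n : Int) = (n : Int) + bL (g.drop n) s := by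
  intro s
  induction s with
  | nil => intro g n; simp [altGo, bL_nil_right]
  | cons c rest ih =>
    intro g n
    simp only [altGo]
    by_cases hn : n < g.length
    · have hdrop : g.drop n = g[n] :: g.drop (n + 1) := List.drop_eq_getElem_cons hn
      have hget : PySem.List.pyGetD g (n : Int) 0 = g[n] := by
        rw [PySem.List.pyGetD_natCast, List.getD_eq_getElem?_getD, List.getElem?_eq_getElem hn,
          Option.getD_some]
      by_cases hc : g[n] ≤ c
      · have hcond : (n : Int) < (g.length : Int) ∧ PySem.List.pyGetD g (n : Int) 0 ≤ c :=
          ⟨by exact_mod_cast hn, by rw [hget]; exact hc⟩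
        rw [if_pos hcond]
        have hcast : ((n : Int) + 1) = ((n + 1 : Nat) : Int) := by push_cast; ring
        rw [hcast, ih g (n + 1), hdrop]
        simp only [bL, if_pos hc]
        push_cast; ring
      · have hcond : ¬ ((n : Int) < (g.length : Int) ∧ PySem.List.pyGetD g (n : Int) 0 ≤ c) := by
          rw [hget]; intro h; exact hc h.2
        rw [if_neg hcond, ih g n, hdrop]
        simp only [bL, if_neg hc]
    · have hdrop : g.drop n = [] := List.drop_eq_nil_of_le (by omega)
      have hcond : ¬ ((n : Int) < (g.length : Int) ∧ PySem.List.pyGetD g (n : Int) 0 ≤ c) := by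
        intro h; exact hn (by exact_mod_cast h.1)
      rw [if_neg hcond, ih g n, hdrop, bL_nil_left, bL_nil_left]

-- ===== VERDICT (by name: the statement is the Claim_ definition above) =====
theorem findContentChildren_spec : Claim_equal_findContentChildren := by
  intro g s _
  unfold Spec_findContentChildren findContentChildren findContentChildren_alt
  rw [PySem.List.slice?_none_none_neg_one, PySem.List.slice?_none_none_neg_one]
  simp only [Option.getD_some]
  have hg : ((PySem.List.sorted g (fun x => x) false).reverse).Pairwise (· ≥ ·) := by
    rw [List.pairwise_reverse]
    exact PySem.List.sorted_pairwise g (fun x => x)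
  have hs : ((PySem.List.sorted s (fun x => x) false).reverse).Pairwise (· ≥ ·) := by
    rw [List.pairwise_reverse]
    exact PySem.List.sorted_pairwise s (fun x => x)
  rw [aLoop_eq_bL _ _ 0 hg hs]
  have hb := altGo_eq_bL (PySem.List.sorted s (fun x => x) false) (PySem.List.sorted g (fun x => x) false) 0
  simp only [Nat.cast_zero, List.drop_zero] at hb
  rw [hb]
  simp [List.reverse_reverse]
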